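-- pv_equiv track=rewrite | github.com/JFPO082000/chatbot | app.py | sanitizar_input
-- ===== SOURCE A (Python) =====
-- def sanitizar_input(texto):
--     """Sanitiza el input del usuario para prevenir inyecciones."""
--     if not texto:
--         return ""
--
--     # Limitar longitud
--     texto = texto[:500]
--
--     # Remover caracteres peligrosos
--     caracteres_peligrosos = ['<', '>', '{', '}', '$', '`']
--     for char in caracteres_peligrosos:
--         texto = texto.replace(char, '')
--
--     return texto.strip()
-- ===== SOURCE B (Python) =====
-- def sanitizar_input(texto):
--     """Sanitiza el input del usuario para prevenir inyecciones."""
--     if not texto: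
--         return ""
--     peligrosos = {'<', '>', '{', '}', '$', '`'}
--     return ''.join(c for c in texto[:500] if c not in peligrosos).strip()
-- ===== Notes on version B (the rewrite author's own statement) =====
-- stated objective: simpler
-- what changed: Replaces six sequential str.replace passes (a loop over the blacklist rebuilding the string each time) with one single pass over the truncated input filtering by set membership.
import Mathlib
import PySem

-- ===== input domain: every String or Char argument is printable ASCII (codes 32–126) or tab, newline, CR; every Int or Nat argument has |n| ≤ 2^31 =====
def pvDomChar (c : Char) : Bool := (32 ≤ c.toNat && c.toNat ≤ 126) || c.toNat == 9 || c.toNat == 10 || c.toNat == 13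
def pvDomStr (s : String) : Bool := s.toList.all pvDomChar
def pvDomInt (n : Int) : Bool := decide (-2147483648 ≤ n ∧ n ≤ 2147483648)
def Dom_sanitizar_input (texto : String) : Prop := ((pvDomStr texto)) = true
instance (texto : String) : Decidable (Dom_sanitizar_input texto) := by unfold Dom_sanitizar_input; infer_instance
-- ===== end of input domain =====

-- B replaces A's six sequential str.replace passes with one filtering pass over the
-- truncated input using a set membership test (objective: simpler).

-- ===== PORT A =====
-- A: guard, truncate to 500, loop over the blacklist doing texto.replace(char, ''), strip.
def sanitizar_input (texto : String) : String :=
  if texto = "" then ""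
  else
    let texto1 := String.ofList (PySem.List.slice texto.toList none (some 500))
    let caracteres_peligrosos : List Char := ['<', '>', '{', '}', '$', '`']
    let texto2 := caracteres_peligrosos.foldl
      (fun t ch => PySem.Str.replace t (String.ofList [ch]) "") texto1
    PySem.Str.strip texto2

-- ===== PORT B =====
-- B: guard, then one pass filtering out the dangerous characters, then strip.
def peligrosos : List Char := ['<', '>', '{', '}', '$', '`']

def sanitizar_input_alt (texto : String) : String :=
  if texto = "" then ""
  else
    PySem.Str.strip (String.ofList
      ((PySem.List.slice texto.toList none (some 500)).filter
        (fun c => !(peligrosos.contains c))))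

-- ===== PRECONDITION & SPEC =====
def Spec_sanitizar_input (texto : String) (out : String) : Prop := out = sanitizar_input_alt texto
instance (texto : String) (out : String) : Decidable (Spec_sanitizar_input texto out) := by unfold Spec_sanitizar_input; infer_instance

-- ===== CLAIM (what is proved, stated in full; the proofs are below) =====
def Claim_equal_sanitizar_input : Prop := ∀ (texto : String), Dom_sanitizar_input texto → Spec_sanitizar_input texto (sanitizar_input texto)

-- ===== LEMMAS AND PROOFS =====

-- replace.go with a single-char pattern and empty replacement is a filter (given enough fuel)
lemma replace_go_single (c : Char) :
    ∀ (fuel : Nat) (l acc : List Char), l.length ≤ fuel →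
      PySem.Chars.replace.go [c] [] fuel l acc
        = acc.reverse ++ l.filter (fun x => !(x == c)) := by
  intro fuel
  induction fuel with
  | zero =>
    intro l acc h
    have : l = [] := List.length_eq_zero_iff.mp (Nat.le_zero.mp h)
    subst this
    simp [PySem.Chars.replace.go]
  | succ n ih =>
    intro l acc h
    cases l with
    | nil => simp [PySem.Chars.replace.go]
    | cons x t =>
      have hlen : t.length ≤ n := by simpa using Nat.le_of_succ_le_succ h
      simp only [PySem.Chars.replace.go, List.isPrefixOf, Bool.and_true]
      by_cases hx : c = x
      · rw [if_pos (by simp [hx])]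
        have hd : List.drop [c].length (x :: t) = t := rfl
        have ha : ([] : List Char).reverse ++ acc = acc := rfl
        rw [hd, ha, ih _ _ hlen]
        simp [hx]
      · rw [if_neg (by simp [hx]), ih _ _ hlen]
        have : x ≠ c := fun e => hx e.symm
        simp [this]

-- s.replace(c, '') for a single character c is a one-char filter
lemma replace_single (c : Char) (s : List Char) :
    PySem.Chars.replace s [c] [] = s.filter (fun x => !(x == c)) := by
  rw [PySem.Chars.replace]
  rw [if_neg (by simp)]
  simpa using replace_go_single c s.length s [] le_rfl

-- A's replace loop over a blacklist equals one filter by non-membership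
lemma foldl_replace_eq_filter :
    ∀ (cs : List Char) (s : List Char),
      cs.foldl (fun t ch => PySem.Chars.replace t [ch] []) s
        = s.filter (fun x => !(cs.contains x)) := by
  intro cs
  induction cs with
  | nil => intro s; simp
  | cons c cs ih =>
    intro s
    rw [List.foldl_cons, replace_single, ih, List.filter_filter]
    apply List.filter_congr
    intro x _
    by_cases hx : x = c <;> simp [hx]

-- A's foldl of Str.replace is the Chars-level foldl, through String.ofList
lemma foldl_str_replace (cs : List Char) :
    ∀ (t : List Char),
      cs.foldl (fun t ch => PySem.Str.replace t (String.ofList [ch]) "") (String.ofList t)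
        = String.ofList (cs.foldl (fun t ch => PySem.Chars.replace t [ch] []) t) := by
  induction cs with
  | nil => intro t; simp
  | cons c cs ih =>
    intro t
    rw [List.foldl_cons, List.foldl_cons]
    have hstep : PySem.Str.replace (String.ofList t) (String.ofList [c]) ""
        = String.ofList (PySem.Chars.replace t [c] []) := by
      simp [PySem.Str.replace]
    rw [hstep, ih]

-- ===== VERDICT (by name: the statement is the Claim_ definition above) =====
theorem sanitizar_input_spec : Claim_equal_sanitizar_input := by
  intro texto _
  unfold Spec_sanitizar_input sanitizar_input sanitizar_input_alt
  by_cases h : texto = ""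
  · simp [h]
  · simp only [if_neg h]
    rw [foldl_str_replace, foldl_replace_eq_filter]
    rfl
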